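-- pv_equiv track=rewrite | github.com/Fondamenti18/fondamenti-di-programmazione | students/1794946/homework04/program01.py | creadiz_finale
-- ===== SOURCE A (Python) =====
-- def dizionario_lunghezza(dizionario,y):
--     diz3={}
--     for el in dizionario:
--         if len(dizionario[el])==y:
--             diz3[el]=dizionario[el]
--     return diz3
--
-- def creadiz_finale(dizionario,y):
--     diz2={}
--     for r in dizionario:
--         diz2[r]=0
--     for el in dizionario_lunghezza(dizionario,y):
--         z=discendenti(dizionario,el, [])
--         z.remove(el)
--         for i in z:
--             diz2[i]+=1
--     return diz2
--
-- def discendenti(dizionario, elemento,lista):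
--     lista.append(elemento)
--     for i in dizionario[elemento]:
--         discendenti(dizionario, i, lista)
--     return lista
-- ===== SOURCE B (Python) =====
-- def creadiz_finale(dizionario, y):
--     # memoized bottom-up path-count counters instead of re-enumerating every subtree per root
--     memo = {}
--
--     def counts(v):
--         c = memo.get(v)
--         if c is not None:
--             return c
--         c = {v: 1}
--         for ch in dizionario[v]:
--             for k, n in counts(ch).items():
--                 c[k] = c.get(k, 0) + n
--         memo[v] = c
--         return c
--
--     result = {r: 0 for r in dizionario}
--     for r in dizionario:
--         if len(dizionario[r]) == y:
--             for k, n in counts(r).items():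
--                 result[k] += n
--             result[r] -= 1
--     return result
-- ===== Notes on version B (the rewrite author's own statement) =====
-- stated objective: alternative
-- what changed: A re-enumerates, for every qualifying root, all root-to-descendant paths into one flat DFS list and increments the result per element; B instead computes a memoized bottom-up counter of path counts per node and adds whole counters into the result.
import Mathlib
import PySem

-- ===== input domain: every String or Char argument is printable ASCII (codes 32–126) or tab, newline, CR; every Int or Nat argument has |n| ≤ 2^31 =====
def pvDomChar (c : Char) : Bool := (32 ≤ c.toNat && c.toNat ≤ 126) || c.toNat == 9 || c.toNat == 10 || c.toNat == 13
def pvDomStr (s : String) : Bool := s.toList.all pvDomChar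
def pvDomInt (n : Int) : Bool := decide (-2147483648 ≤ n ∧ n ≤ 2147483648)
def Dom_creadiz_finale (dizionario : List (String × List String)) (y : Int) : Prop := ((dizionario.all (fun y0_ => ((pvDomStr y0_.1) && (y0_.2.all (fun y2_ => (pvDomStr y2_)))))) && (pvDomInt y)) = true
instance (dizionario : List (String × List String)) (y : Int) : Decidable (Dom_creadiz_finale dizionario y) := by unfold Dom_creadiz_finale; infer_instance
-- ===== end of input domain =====

-- B replaces A's per-root descendant re-enumeration (flat DFS list + per-element increments)
-- by one memoized bottom-up pass computing a path-count counter per node (objective: alternative).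


-- ===== PORT A =====
-- helper: discendenti(dizionario, elemento, lista) with fuel (Python recursion; none = KeyError/unbounded recursion)
def pvDiscA (d : PySem.Dict String (List String)) : Nat → String → List String → Option (List String)
  | 0, _, _ => none
  | fuel+1, el, lista =>
    let lista' := lista ++ [el]
    match d.get? el with
    | none => none
    | some cs => cs.foldl (fun acc i => acc.bind (fun l => pvDiscA d fuel i l)) (some lista')

-- helper: dizionario_lunghezza(dizionario, y)
def pvDizLun (d : PySem.Dict String (List String)) (y : Int) : PySem.Dict String (List String) :=
  d.keys.foldl (fun diz3 el => if ((d.getD el []).length : Int) = y then diz3.insert el (d.getD el []) else diz3) PySem.Dict.empty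

def creadiz_finale (dizionario : List (String × List String)) (y : Int) : List (String × Int) :=
  let d := PySem.Dict.ofList dizionario
  let diz2 := d.keys.foldl (fun dz r => dz.insert r (0 : Int)) PySem.Dict.empty
  let res := (pvDizLun d y).keys.foldl
    (fun acc el =>
      acc.bind fun dz =>
        (pvDiscA d (d.size + 1) el []).bind fun z =>
          (PySem.List.remove? z el).bind fun z' =>
            z'.foldl (fun a i => a.bind fun dz2 =>
                if dz2.contains i then some (dz2.modify i 0 (· + 1)) else none)
              (some dz))
    (some diz2)
  match res with
  | some dz => dz.items
  | none => []

-- ===== PORT B =====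
-- helper: "for k, n in cc.items(): c[k] = c.get(k, 0) + n"
def pvMerge (c cc : PySem.Dict String Int) : PySem.Dict String Int :=
  cc.items.foldl (fun c p => c.insert p.1 (c.getD p.1 0 + p.2)) c

-- helper: memoized counts(v) (fuel models Python's recursion; none = KeyError/unbounded recursion)
def pvCounts (d : PySem.Dict String (List String)) :
    Nat → PySem.Dict String (PySem.Dict String Int) → String →
    Option (PySem.Dict String (PySem.Dict String Int) × PySem.Dict String Int)
  | 0, _, _ => none
  | fuel+1, memo, v =>
    match memo.get? v with
    | some c => some (memo, c)
    | none =>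
      match d.get? v with
      | none => none
      | some cs =>
        match cs.foldl (fun acc ch => acc.bind fun mc =>
            (pvCounts d fuel mc.1 ch).map fun mc' => (mc'.1, pvMerge mc.2 mc'.2))
          (some (memo, PySem.Dict.empty.insert v 1)) with
        | none => none
        | some (memo', c) => some (memo'.insert v c, c)

def creadiz_finale_alt (dizionario : List (String × List String)) (y : Int) : List (String × Int) :=
  let d := PySem.Dict.ofList dizionario
  let result0 := d.keys.foldl (fun dz r => dz.insert r (0 : Int)) PySem.Dict.empty
  let res := d.keys.foldl
    (fun acc r =>
      acc.bind fun st =>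
        if ((d.getD r []).length : Int) = y then
          (pvCounts d (d.size + 1) st.1 r).bind fun mc =>
            (mc.2.items.foldl (fun a p => a.bind fun rs =>
                if rs.contains p.1 then some (rs.modify p.1 0 (· + p.2)) else none)
              (some st.2)).map fun rs => (mc.1, rs.modify r 0 (· - 1))
        else some st)
    (some ((PySem.Dict.empty : PySem.Dict String (PySem.Dict String Int)), result0))
  match res with
  | some st => st.2.items
  | none => []

-- ===== PRECONDITION & SPEC =====
-- helpers for Pre_: bounded reachability in the graph "key -> its child list"
def pvStep (d : PySem.Dict String (List String)) (S : List String) : List String :=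
  (S ++ S.flatMap (fun x => d.getD x [])).dedup

def pvExpand (d : PySem.Dict String (List String)) : Nat → List String → List String
  | 0, S => S
  | n+1, S => pvExpand d n (pvStep d S)

def pvSel (d : PySem.Dict String (List String)) (y : Int) : List String :=
  d.keys.filter (fun k => ((d.getD k []).length : Int) == y)

def pvRAll (d : PySem.Dict String (List String)) (y : Int) : List String :=
  pvExpand d d.size (pvSel d y)

-- Pre_ = exactly the inputs where Python A returns: every node reachable from a key with y
-- children is itself a key, and no such reachable node lies on a cycle (else KeyError /
-- unbounded recursion in `discendenti`).
def Pre_creadiz_finale (dizionario : List (String × List String)) (y : Int) : Prop :=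
  (∀ x ∈ pvRAll (PySem.Dict.ofList dizionario) y, x ∈ (PySem.Dict.ofList dizionario).keys) ∧
  (∀ x ∈ pvRAll (PySem.Dict.ofList dizionario) y,
    x ∉ pvExpand (PySem.Dict.ofList dizionario) (PySem.Dict.ofList dizionario).size
          ((PySem.Dict.ofList dizionario).getD x []))
instance (dizionario : List (String × List String)) (y : Int) : Decidable (Pre_creadiz_finale dizionario y) := by
  unfold Pre_creadiz_finale; infer_instance

def pvWitness_creadiz_finale : (List (String × List String)) × Int :=
  ([("a", ["b", "c"]), ("b", ["c"]), ("c", [])], 2)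

def Spec_creadiz_finale (dizionario : List (String × List String)) (y : Int) (out : List (String × Int)) : Prop := out = creadiz_finale_alt dizionario y
instance (dizionario : List (String × List String)) (y : Int) (out : List (String × Int)) : Decidable (Spec_creadiz_finale dizionario y out) := by unfold Spec_creadiz_finale; infer_instance

-- ===== CLAIM (what is proved, stated in full; the proofs are below) =====
def Claim_equal_creadiz_finale : Prop := ∀ (dizionario : List (String × List String)) (y : Int), Dom_creadiz_finale dizionario y → Pre_creadiz_finale dizionario y → Spec_creadiz_finale dizionario y (creadiz_finale dizionario y)

-- ===== LEMMAS AND PROOFS =====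

-- ----- graph infrastructure for Pre_ -----

lemma pv_mem_step (d : PySem.Dict String (List String)) (S : List String) (x : String) :
    x ∈ pvStep d S ↔ x ∈ S ∨ ∃ p ∈ S, x ∈ d.getD p [] := by
  simp [pvStep, List.mem_dedup, List.mem_append, List.mem_flatMap]

lemma pv_expand_nil (d : PySem.Dict String (List String)) (n : Nat) : pvExpand d n [] = [] := by
  induction n with
  | zero => rfl
  | succ n ih => simpa [pvExpand, pvStep] using ih

lemma pv_expand_shift (d : PySem.Dict String (List String)) (n : Nat) (S : List String) :
    pvExpand d (n+1) S = pvStep d (pvExpand d n S) := by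
  induction n generalizing S with
  | zero => rfl
  | succ n ih => exact ih (pvStep d S)

lemma pv_step_mono (d : PySem.Dict String (List String)) {S T : List String}
    (h : ∀ x ∈ S, x ∈ T) : ∀ x ∈ pvStep d S, x ∈ pvStep d T := by
  intro x hx
  rw [pv_mem_step] at hx ⊢
  rcases hx with hx | ⟨p, hp, hxp⟩
  · exact Or.inl (h x hx)
  · exact Or.inr ⟨p, h p hp, hxp⟩

lemma pv_expand_mono (d : PySem.Dict String (List String)) (n : Nat) {S T : List String}
    (h : ∀ x ∈ S, x ∈ T) : ∀ x ∈ pvExpand d n S, x ∈ pvExpand d n T := by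
  induction n generalizing S T with
  | zero => exact h
  | succ n ih => exact ih (pv_step_mono d h)

lemma pv_subset_expand (d : PySem.Dict String (List String)) (n : Nat) (S : List String) :
    ∀ x ∈ S, x ∈ pvExpand d n S := by
  induction n generalizing S with
  | zero => intro x hx; exact hx
  | succ n ih =>
    intro x hx
    exact ih (pvStep d S) x ((pv_mem_step d S x).2 (Or.inl hx))

lemma pv_expand_fuel_mono (d : PySem.Dict String (List String)) {m n : Nat} (h : m ≤ n)
    (S : List String) : ∀ x ∈ pvExpand d m S, x ∈ pvExpand d n S := by
  induction n with
  | zero => intro x hx; simpa [Nat.le_zero.mp h] using hx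
  | succ n ih =>
    intro x hx
    rcases Nat.lt_or_ge m (n+1) with hm | hm
    · rw [pv_expand_shift]
      have := ih (Nat.lt_succ_iff.mp hm) x hx
      exact (pv_mem_step d _ x).2 (Or.inl this)
    · have : m = n + 1 := Nat.le_antisymm h hm
      subst this; exact hx

lemma pv_step_congr (d : PySem.Dict String (List String)) {S T : List String}
    (h : ∀ x, x ∈ S ↔ x ∈ T) : ∀ x, x ∈ pvStep d S ↔ x ∈ pvStep d T :=
  fun x => ⟨fun hx => pv_step_mono d (fun z hz => (h z).1 hz) x hx,
            fun hx => pv_step_mono d (fun z hz => (h z).2 hz) x hx⟩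

lemma pv_expand_child (d : PySem.Dict String (List String)) {n : Nat} {S : List String}
    {x c : String} (hx : x ∈ pvExpand d n S) (hc : c ∈ d.getD x []) :
    c ∈ pvExpand d (n+1) S := by
  rw [pv_expand_shift]
  exact (pv_mem_step d _ c).2 (Or.inr ⟨x, hx, hc⟩)

lemma pv_keys_length (d : PySem.Dict String (List String)) : d.keys.length = d.size := by
  simp [PySem.Dict.keys, PySem.Dict.size]

lemma pv_sat (d : PySem.Dict String (List String)) {S : List String}
    (h : ∀ x ∈ pvExpand d d.size S, x ∈ d.keys) :
    ∀ x ∈ pvExpand d d.size S, ∀ c ∈ d.getD x [], c ∈ pvExpand d d.size S := by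
  by_cases hS : S = []
  · subst hS; simp [pv_expand_nil]
  · -- some step j < d.size reaches a fixpoint (in the membership sense)
    have hEq : ∃ j < d.size, ∀ x, x ∈ pvExpand d j S ↔ x ∈ pvExpand d (j+1) S := by
      by_contra hno
      push Not at hno
      have grow : ∀ j ≤ d.size, j + S.toFinset.card ≤ (pvExpand d j S).toFinset.card := by
        intro j hj
        induction j with
        | zero => simp [pvExpand]
        | succ j ih =>
          have hjlt : j < d.size := Nat.lt_of_succ_le hj
          have hsub : (pvExpand d j S).toFinset ⊆ (pvExpand d (j+1) S).toFinset := by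
            intro x hx
            simp only [List.mem_toFinset] at hx ⊢
            exact pv_expand_fuel_mono d (Nat.le_succ j) S x hx
          obtain ⟨w, hw⟩ := hno j hjlt
          have hne : ¬ ((pvExpand d (j+1) S).toFinset ⊆ (pvExpand d j S).toFinset) := by
            intro hcon
            rcases hw with ⟨hwj, hwj1⟩ | ⟨hwj, hwj1⟩
            · exact hwj1 (pv_expand_fuel_mono d (Nat.le_succ j) S w hwj)
            · exact hwj (by simpa [List.mem_toFinset] using hcon (List.mem_toFinset.2 hwj1))
          have : (pvExpand d j S).toFinset ⊂ (pvExpand d (j+1) S).toFinset := ⟨hsub, hne⟩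
          have hcard := Finset.card_lt_card this
          have := ih (Nat.le_of_lt hjlt)
          omega
      have h1 := grow d.size le_rfl
      have h2 : (pvExpand d d.size S).toFinset.card ≤ d.size := by
        calc (pvExpand d d.size S).toFinset.card
            ≤ d.keys.toFinset.card := by
              apply Finset.card_le_card
              intro x hx
              simp only [List.mem_toFinset] at hx ⊢
              exact h x hx
          _ ≤ d.keys.length := List.toFinset_card_le d.keys
          _ = d.size := pv_keys_length d
      have h3 : 0 < S.toFinset.card := by
        rcases List.exists_mem_of_ne_nil S hS with ⟨a, ha⟩
        exact Finset.card_pos.2 ⟨a, List.mem_toFinset.2 ha⟩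
      omega
    obtain ⟨j, hj, hfix⟩ := hEq
    have prop : ∀ m, j ≤ m → (∀ x, x ∈ pvExpand d m S ↔ x ∈ pvExpand d (m+1) S) := by
      intro m hm
      induction m with
      | zero =>
        have hj0 : j = 0 := Nat.le_zero.mp hm
        subst hj0; exact hfix
      | succ m ih =>
        rcases Nat.lt_or_ge j (m+1) with hj2 | hj2
        · have hm' := ih (Nat.lt_succ_iff.mp hj2)
          intro x
          rw [pv_expand_shift d m S, pv_expand_shift d (m+1) S, pv_expand_shift d m S]
          exact pv_step_congr d (by intro z; rw [← pv_expand_shift d m S]; exact hm' z) x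
        · have : j = m + 1 := Nat.le_antisymm hm hj2
          subst this; exact hfix
    intro x hx c hc
    have hc1 : c ∈ pvExpand d (d.size + 1) S := pv_expand_child d hx hc
    exact (prop d.size (Nat.le_of_lt hj) c).2 hc1

-- measure: number of distinct nodes reachable (in ≥ 1 step) from v
def pvM (d : PySem.Dict String (List String)) (v : String) : Nat :=
  (pvExpand d d.size (d.getD v [])).toFinset.card

-- everything the port-level lemmas need about the reachable region R
structure pvGood (d : PySem.Dict String (List String)) (R : List String) : Prop where
  keysR : ∀ x ∈ R, x ∈ d.keys
  closed : ∀ x ∈ R, ∀ c ∈ d.getD x [], c ∈ R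
  mlt : ∀ x ∈ R, ∀ c ∈ d.getD x [], pvM d c < pvM d x
  mle : ∀ x ∈ R, pvM d x < d.size + 1

lemma pv_closed_inv (d : PySem.Dict String (List String)) {R : List String}
    (hcl : ∀ x ∈ R, ∀ c ∈ d.getD x [], c ∈ R) (n : Nat) :
    ∀ x, x ∈ pvExpand d n R ↔ x ∈ R := by
  induction n with
  | zero => intro x; rfl
  | succ n ih =>
    intro x
    rw [pv_expand_shift]
    constructor
    · intro hx
      rcases (pv_mem_step d _ x).1 hx with hx' | ⟨p, hp, hxp⟩
      · exact (ih x).1 hx'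
      · exact hcl p ((ih p).1 hp) x hxp
    · intro hx
      exact (pv_mem_step d _ x).2 (Or.inl ((ih x).2 hx))

lemma pv_pre_good (d : PySem.Dict String (List String)) (y : Int)
    (h1 : ∀ x ∈ pvRAll d y, x ∈ d.keys)
    (h2 : ∀ x ∈ pvRAll d y, x ∉ pvExpand d d.size (d.getD x [])) :
    pvGood d (pvRAll d y) := by
  have hcl : ∀ x ∈ pvRAll d y, ∀ c ∈ d.getD x [], c ∈ pvRAll d y := pv_sat d h1
  refine ⟨h1, hcl, ?_, ?_⟩
  · intro x hx c hc
    have hcR : c ∈ pvRAll d y := hcl x hx c hc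
    -- Reach x ⊆ R
    have rx_sub : ∀ z ∈ pvExpand d d.size (d.getD x []), z ∈ pvRAll d y := by
      intro z hz
      have := pv_expand_mono d d.size (fun w hw => hcl x hx w hw) z hz
      exact (pv_closed_inv d hcl d.size z).1 this
    -- Reach x is closed
    have rx_closed : ∀ z ∈ pvExpand d d.size (d.getD x []),
        ∀ w ∈ d.getD z [], w ∈ pvExpand d d.size (d.getD x []) :=
      pv_sat d (fun z hz => h1 z (rx_sub z hz))
    have c_mem : c ∈ pvExpand d d.size (d.getD x []) := pv_subset_expand d d.size _ c hc
    -- Reach c ⊆ Reach x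
    have rc_sub : ∀ z ∈ pvExpand d d.size (d.getD c []), z ∈ pvExpand d d.size (d.getD x []) := by
      intro z hz
      have hsub : ∀ w ∈ d.getD c [], w ∈ pvExpand d d.size (d.getD x []) := rx_closed c c_mem
      have := pv_expand_mono d d.size hsub z hz
      exact (pv_closed_inv d rx_closed d.size z).1 this
    have c_not : c ∉ pvExpand d d.size (d.getD c []) := h2 c hcR
    apply Finset.card_lt_card
    constructor
    · intro z hz
      simp only [List.mem_toFinset] at hz ⊢
      exact rc_sub z hz
    · intro hcon
      apply c_not
      have := hcon (by simpa [List.mem_toFinset] using c_mem)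
      simpa [List.mem_toFinset] using this
  · intro x hx
    have rx_sub : ∀ z ∈ pvExpand d d.size (d.getD x []), z ∈ pvRAll d y := by
      intro z hz
      have := pv_expand_mono d d.size (fun w hw => hcl x hx w hw) z hz
      exact (pv_closed_inv d hcl d.size z).1 this
    have : (pvExpand d d.size (d.getD x [])).toFinset.card ≤ d.size := by
      calc (pvExpand d d.size (d.getD x [])).toFinset.card
          ≤ d.keys.toFinset.card := by
            apply Finset.card_le_card
            intro z hz
            simp only [List.mem_toFinset] at hz ⊢
            exact h1 z (rx_sub z hz)
        _ ≤ d.keys.length := List.toFinset_card_le d.keys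
        _ = d.size := pv_keys_length d
    unfold pvM
    omega
-- ----- A-side: pure traversal and path counts -----

def pvTrav (d : PySem.Dict String (List String)) : Nat → String → List String
  | 0, _ => []
  | fuel+1, v => v :: (d.getD v []).flatMap (pvTrav d fuel)

-- number of occurrences of i in the full DFS enumeration from v = number of paths v ⇝ i
def pvPCn (d : PySem.Dict String (List String)) (v i : String) : Nat :=
  (pvTrav d (d.size + 1) v).count i

lemma pv_get_key (d : PySem.Dict String (List String)) {v : String} (hv : v ∈ d.keys) :
    d.get? v = some (d.getD v []) := by
  cases h : d.get? v with
  | none => exact absurd ((PySem.Dict.get?_eq_none_iff_not_mem_keys d v).mp h) (by simpa using hv)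
  | some cs => rw [PySem.Dict.getD_of_get?_eq_some d [] h]

lemma pv_trav_stable (d : PySem.Dict String (List String)) {R : List String} (hg : pvGood d R) :
    ∀ fuel fuel' v, v ∈ R → pvM d v < fuel → pvM d v < fuel' →
      pvTrav d fuel v = pvTrav d fuel' v := by
  intro fuel
  induction fuel with
  | zero => omega
  | succ fuel ih =>
    intro fuel' v hv h1 h2
    cases fuel' with
    | zero => omega
    | succ fuel' =>
      simp only [pvTrav]
      congr 1
      rw [List.flatMap_def, List.flatMap_def]
      congr 1
      apply List.map_congr_left
      intro c hc
      exact ih fuel' c (hg.closed v hv c hc)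
        (by have := hg.mlt v hv c hc; omega) (by have := hg.mlt v hv c hc; omega)

lemma pv_trav_mem (d : PySem.Dict String (List String)) {R : List String} (hg : pvGood d R) :
    ∀ fuel v, v ∈ R → ∀ x ∈ pvTrav d fuel v, x ∈ R := by
  intro fuel
  induction fuel with
  | zero => intro v _ x hx; simp [pvTrav] at hx
  | succ fuel ih =>
    intro v hv x hx
    simp only [pvTrav, List.mem_cons, List.mem_flatMap] at hx
    rcases hx with rfl | ⟨c, hc, hxc⟩
    · exact hv
    · exact ih c (hg.closed v hv c hc) x hxc

-- the Option-threaded DFS of port A succeeds and appends the pure traversal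
lemma pv_discA_eq (d : PySem.Dict String (List String)) {R : List String} (hg : pvGood d R) :
    ∀ fuel v acc, v ∈ R → pvM d v < fuel →
      pvDiscA d fuel v acc = some (acc ++ pvTrav d fuel v) := by
  intro fuel
  induction fuel with
  | zero => omega
  | succ fuel ih =>
    intro v acc hv hfv
    have hkey := pv_get_key d (hg.keysR v hv)
    simp only [pvDiscA, hkey]
    have aux : ∀ cs : List String, (∀ c ∈ cs, c ∈ R ∧ pvM d c < fuel) → ∀ l0 : List String,
        cs.foldl (fun acc i => acc.bind (fun l => pvDiscA d fuel i l)) (some l0)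
          = some (l0 ++ cs.flatMap (pvTrav d fuel)) := by
      intro cs
      induction cs with
      | nil => intro _ l0; simp
      | cons c cs ihc =>
        intro hcs l0
        have hc := hcs c (List.mem_cons_self)
        simp only [List.foldl_cons, Option.bind_some, ih c l0 hc.1 hc.2]
        rw [ihc (fun z hz => hcs z (List.mem_cons_of_mem c hz)) (l0 ++ pvTrav d fuel c)]
        simp [List.flatMap_cons]
    rw [aux (d.getD v []) (fun c hc => ⟨hg.closed v hv c hc,
          by have := hg.mlt v hv c hc; omega⟩) (acc ++ [v])]
    simp [pvTrav]

-- counts over a flatMap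
lemma pv_count_flatMap (f : String → List String) (i : String) :
    ∀ l : List String, (l.flatMap f).count i = (l.map (fun c => (f c).count i)).sum := by
  intro l
  induction l with
  | nil => simp
  | cons c l ih => simp [List.flatMap_cons, List.count_append, ih]

-- the path-count recurrence (in Int, as the dict values are)
lemma pv_pc_rec (d : PySem.Dict String (List String)) {R : List String} (hg : pvGood d R)
    {v : String} (hv : v ∈ R) (i : String) :
    (pvPCn d v i : Int)
      = (if v = i then 1 else 0) + ((d.getD v []).map (fun c => (pvPCn d c i : Int))).sum := by
  unfold pvPCn
  have hexp : pvTrav d (d.size + 1) v = v :: (d.getD v []).flatMap (pvTrav d d.size) := by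
    simp [pvTrav]
  rw [hexp, List.count_cons, pv_count_flatMap]
  have hmap : (d.getD v []).map (fun c => (pvTrav d d.size c).count i)
      = (d.getD v []).map (fun c => (pvTrav d (d.size+1) c).count i) := by
    apply List.map_congr_left
    intro c hc
    rw [pv_trav_stable d hg d.size (d.size+1) c (hg.closed v hv c hc)
      (by have := hg.mlt v hv c hc; have := hg.mle v hv; omega)
      (by have := hg.mle v hv; have := hg.mlt v hv c hc; omega)]
  rw [hmap, Nat.cast_add, Nat.cast_list_sum, List.map_map]
  by_cases h : v = i <;> · simp [h, add_comm]; rfl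

-- ----- generic dict-fold value lemmas -----

lemma pv_getD_merge_fold (l : List (String × Int)) :
    ∀ (c : PySem.Dict String Int) (i : String),
    (l.foldl (fun c p => c.insert p.1 (c.getD p.1 0 + p.2)) c).getD i 0
      = c.getD i 0 + ((l.filter (fun p => p.1 == i)).map (·.2)).sum := by
  induction l with
  | nil => intro c i; simp
  | cons p l ih =>
    intro c i
    rw [List.foldl_cons, ih]
    by_cases h : p.1 = i
    · simp [h]
      ring
    · simp [h, PySem.Dict.getD_insert, Ne.symm h]

lemma pv_getD_modifyp_fold (l : List (String × Int)) :
    ∀ (res : PySem.Dict String Int) (k : String),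
    (l.foldl (fun r p => r.modify p.1 0 (· + p.2)) res).getD k 0
      = res.getD k 0 + ((l.filter (fun p => p.1 == k)).map (·.2)).sum := by
  induction l with
  | nil => intro res k; simp
  | cons p l ih =>
    intro res k
    rw [List.foldl_cons, ih]
    by_cases h : p.1 = k
    · simp [h]
      ring
    · simp [h, PySem.Dict.getD_modify, Ne.symm h]

-- getD of a dict with Nodup keys as a filtered sum over its items
lemma pv_getD_eq_filter_sum_aux (l : List (String × Int)) (i : String)
    (hnd : (l.map Prod.fst).Nodup) :
    (PySem.Dict.mk l).getD i 0 = ((l.filter (fun p => p.1 == i)).map (·.2)).sum := by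
  induction l with
  | nil => simp [PySem.Dict.getD_eq_get?_getD, PySem.Dict.get?]
  | cons p l ih =>
    obtain ⟨k, v⟩ := p
    simp only [List.map_cons, List.nodup_cons] at hnd
    rw [PySem.Dict.getD_eq_get?_getD, PySem.Dict.get?_mk_cons]
    by_cases h : k = i
    · subst h
      simp only [beq_self_eq_true]
      have hfil : l.filter (fun p => p.1 == k) = [] := by
        apply List.filter_eq_nil_iff.2
        intro p hp hcon
        have hpk : p.1 = k := by simpa using hcon
        have hmem : p.1 ∈ l.map Prod.fst := List.mem_map_of_mem hp
        rw [hpk] at hmem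
        exact hnd.1 hmem
      simp [hfil]
    · have hki : (k == i) = false := by simp [h]
      rw [if_neg (by simp [hki]), ← PySem.Dict.getD_eq_get?_getD, ih hnd.2]
      simp [hki]

lemma pv_getD_eq_filter_sum (c : PySem.Dict String Int) (i : String) (hnd : c.keys.Nodup) :
    c.getD i 0 = ((c.items.filter (fun p => p.1 == i)).map (·.2)).sum := by
  cases c with
  | mk l => exact pv_getD_eq_filter_sum_aux l i (by simpa [PySem.Dict.keys] using hnd)

-- a guarded (contains-checked) modify loop succeeds and equals the plain fold
lemma pv_guard_fold_pairs (l : List (String × Int)) :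
    ∀ (res : PySem.Dict String Int), (∀ p ∈ l, p.1 ∈ res.keys) →
    l.foldl (fun a p => a.bind fun r =>
        if r.contains p.1 then some (r.modify p.1 0 (· + p.2)) else none) (some res)
      = some (l.foldl (fun r p => r.modify p.1 0 (· + p.2)) res) := by
  induction l with
  | nil => intro res _; simp
  | cons p l ih =>
    intro res hks
    have hc : res.contains p.1 := (PySem.Dict.contains_iff_mem_keys res p.1).2 (hks p List.mem_cons_self)
    simp only [List.foldl_cons, Option.bind_some, hc, if_pos]
    apply ih
    intro q hq
    have : (res.modify p.1 0 (· + p.2)).keys = (res.insert p.1 _).keys := PySem.Dict.keys_modify ..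
    rw [this]
    rw [PySem.Dict.mem_keys_insert]
    exact Or.inr (hks q (List.mem_cons_of_mem p hq))

lemma pv_guard_fold_elems (l : List String) :
    ∀ (res : PySem.Dict String Int), (∀ i ∈ l, i ∈ res.keys) →
    l.foldl (fun a i => a.bind fun r =>
        if r.contains i then some (r.modify i 0 (· + 1)) else none) (some res)
      = some (l.foldl (fun r i => r.modify i 0 (· + 1)) res) := by
  induction l with
  | nil => intro res _; simp
  | cons x l ih =>
    intro res hks
    have hc : res.contains x := (PySem.Dict.contains_iff_mem_keys res x).2 (hks x List.mem_cons_self)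
    simp only [List.foldl_cons, Option.bind_some, hc, if_pos]
    apply ih
    intro q hq
    rw [PySem.Dict.keys_modify .., PySem.Dict.mem_keys_insert]
    exact Or.inr (hks q (List.mem_cons_of_mem x hq))

-- keys are preserved by the plain modify folds
lemma pv_keys_modifyp_fold (l : List (String × Int)) :
    ∀ (res : PySem.Dict String Int), (∀ p ∈ l, p.1 ∈ res.keys) →
    (l.foldl (fun r p => r.modify p.1 0 (· + p.2)) res).keys = res.keys := by
  induction l with
  | nil => intro res _; rfl
  | cons p l ih =>
    intro res hks
    rw [List.foldl_cons, ih]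
    · rw [PySem.Dict.keys_modify .., PySem.Dict.keys_insert_of_contains]
      exact (PySem.Dict.contains_iff_mem_keys res p.1).2 (hks p List.mem_cons_self)
    · intro q hq
      rw [PySem.Dict.keys_modify .., PySem.Dict.mem_keys_insert]
      exact Or.inr (hks q (List.mem_cons_of_mem p hq))

lemma pv_keys_modify1_fold (l : List String) :
    ∀ (res : PySem.Dict String Int), (∀ i ∈ l, i ∈ res.keys) →
    (l.foldl (fun r i => r.modify i 0 (· + 1)) res).keys = res.keys := by
  induction l with
  | nil => intro res _; rfl
  | cons x l ih =>
    intro res hks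
    rw [List.foldl_cons, ih]
    · rw [PySem.Dict.keys_modify .., PySem.Dict.keys_insert_of_contains]
      exact (PySem.Dict.contains_iff_mem_keys res x).2 (hks x List.mem_cons_self)
    · intro q hq
      rw [PySem.Dict.keys_modify .., PySem.Dict.mem_keys_insert]
      exact Or.inr (hks q (List.mem_cons_of_mem x hq))

-- the zero-initialised result dict
lemma pv_getD_init_fold (l : List String) :
    ∀ (res : PySem.Dict String Int) (k : String), res.getD k 0 = 0 →
    (l.foldl (fun r x => r.insert x (0 : Int)) res).getD k 0 = 0 := by
  induction l with
  | nil => intro res k h; exact h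
  | cons x l ih =>
    intro res k h
    rw [List.foldl_cons]
    apply ih
    rw [PySem.Dict.getD_insert]
    by_cases hk : k = x <;> simp [hk, h]
-- ----- B-side: correctness of the memoized counters -----

structure pvCtrOK (d : PySem.Dict String (List String)) (R : List String)
    (c : PySem.Dict String Int) (v : String) : Prop where
  nodup : c.keys.Nodup
  supp : ∀ p ∈ c.items, p.1 ∈ R
  val : ∀ i, c.getD i 0 = (pvPCn d v i : Int)

def pvMemoOK (d : PySem.Dict String (List String)) (R : List String)
    (memo : PySem.Dict String (PySem.Dict String Int)) : Prop :=
  ∀ p ∈ memo.items, pvCtrOK d R p.2 p.1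

lemma pv_supp_keys {R : List String} {c : PySem.Dict String Int}
    (h : ∀ p ∈ c.items, p.1 ∈ R) : ∀ k ∈ c.keys, k ∈ R := by
  intro k hk
  simp only [PySem.Dict.keys, List.mem_map] at hk
  obtain ⟨p, hp, rfl⟩ := hk
  exact h p hp

lemma pv_merge_ok {R : List String}
    {c cc : PySem.Dict String Int}
    (hnd : c.keys.Nodup) (hsupp : ∀ p ∈ c.items, p.1 ∈ R)
    (hccnd : cc.keys.Nodup) (hccsupp : ∀ p ∈ cc.items, p.1 ∈ R) :
    (pvMerge c cc).keys.Nodup ∧ (∀ p ∈ (pvMerge c cc).items, p.1 ∈ R) ∧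
    (∀ i, (pvMerge c cc).getD i 0 = c.getD i 0 + cc.getD i 0) := by
  refine ⟨?_, ?_, ?_⟩
  · exact PySem.Dict.nodup_keys_foldl_insert_key cc.items Prod.fst
      (fun c p => c.getD p.1 0 + p.2) c hnd
  · intro p hp
    have hk : p.1 ∈ (pvMerge c cc).keys := PySem.Dict.mem_keys_of_mem_items _ hp
    rw [pvMerge, PySem.Dict.keys_foldl_insert_key, PySem.Set.mem_update] at hk
    rcases hk with hk | hk
    · exact pv_supp_keys hsupp p.1 hk
    · exact pv_supp_keys hccsupp p.1 (by simpa [PySem.Dict.keys] using hk)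
  · intro i
    rw [pvMerge, pv_getD_merge_fold, ← pv_getD_eq_filter_sum cc i hccnd]

lemma pv_counts_ok (d : PySem.Dict String (List String)) {R : List String} (hg : pvGood d R) :
    ∀ fuel v memo, pvMemoOK d R memo → v ∈ R → pvM d v < fuel →
    ∃ memo' c, pvCounts d fuel memo v = some (memo', c) ∧ pvMemoOK d R memo' ∧ pvCtrOK d R c v := by
  intro fuel
  induction fuel with
  | zero => omega
  | succ fuel ih =>
    intro v memo hm hv hfv
    cases hhit : memo.get? v with
    | some c =>
      exact ⟨memo, c, by simp [pvCounts, hhit], hm,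
        hm (v, c) (PySem.Dict.mem_items_of_get?_eq_some memo hhit)⟩
    | none =>
      have hkey := pv_get_key d (hg.keysR v hv)
      have hbase_items : (PySem.Dict.empty.insert v (1 : Int)).items = [(v, 1)] := by
        rw [PySem.Dict.items_insert_of_not_contains _ _ (PySem.Dict.contains_empty v)]
        rfl
      have hbase_nd : (PySem.Dict.empty.insert v (1 : Int)).keys.Nodup := by
        simp [PySem.Dict.keys, hbase_items]
      have hbase_supp : ∀ p ∈ (PySem.Dict.empty.insert v (1 : Int)).items, p.1 ∈ R := by
        intro p hp
        rw [hbase_items, List.mem_singleton] at hp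
        subst hp; exact hv
      have hbase_val : ∀ i, (PySem.Dict.empty.insert v (1 : Int)).getD i 0
          = if i = v then 1 else 0 := by
        intro i
        rw [PySem.Dict.getD_insert]
        by_cases h : i = v <;> simp [h]
      have aux : ∀ cs : List String, (∀ ch ∈ cs, ch ∈ R ∧ pvM d ch < fuel) →
          ∀ memo0 (c0 : PySem.Dict String Int), pvMemoOK d R memo0 → c0.keys.Nodup →
            (∀ p ∈ c0.items, p.1 ∈ R) →
          ∃ memo1 c1,
            cs.foldl (fun acc ch => acc.bind fun mc =>
                (pvCounts d fuel mc.1 ch).map fun mc' => (mc'.1, pvMerge mc.2 mc'.2))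
              (some (memo0, c0)) = some (memo1, c1)
            ∧ pvMemoOK d R memo1 ∧ c1.keys.Nodup ∧ (∀ p ∈ c1.items, p.1 ∈ R)
            ∧ ∀ i, c1.getD i 0 = c0.getD i 0 + ((cs.map (fun ch => (pvPCn d ch i : Int))).sum) := by
        intro cs
        induction cs with
        | nil =>
          intro _ memo0 c0 hm0 hnd0 hs0
          exact ⟨memo0, c0, by simp, hm0, hnd0, hs0, by simp⟩
        | cons ch cs ihc =>
          intro hcs memo0 c0 hm0 hnd0 hs0
          have hch := hcs ch List.mem_cons_self
          obtain ⟨memoc, cc, hcall, hmc, hcc⟩ := ih ch memo0 hm0 hch.1 hch.2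
          have hmerge := pv_merge_ok hnd0 hs0 hcc.nodup hcc.supp
          obtain ⟨memo1, c1, hfold, hm1, hnd1, hs1, hval1⟩ :=
            ihc (fun z hz => hcs z (List.mem_cons_of_mem ch hz)) memoc (pvMerge c0 cc)
              hmc hmerge.1 hmerge.2.1
          refine ⟨memo1, c1, ?_, hm1, hnd1, hs1, ?_⟩
          · simp only [List.foldl_cons, Option.bind_some, hcall, Option.map_some]
            exact hfold
          · intro i
            rw [hval1 i, hmerge.2.2 i, hcc.val i]
            simp [add_assoc]
      obtain ⟨memo1, c1, hfold, hm1, hnd1, hs1, hval1⟩ :=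
        aux (d.getD v []) (fun ch hch => ⟨hg.closed v hv ch hch,
            by have := hg.mlt v hv ch hch; omega⟩)
          memo (PySem.Dict.empty.insert v 1) hm hbase_nd hbase_supp
      have hctr : pvCtrOK d R c1 v := ⟨hnd1, hs1, fun i => by
        rw [hval1 i, hbase_val i, pv_pc_rec d hg hv i]
        congr 1
        by_cases h : v = i <;> simp [h, eq_comm]⟩
      refine ⟨memo1.insert v c1, c1, ?_, ?_, hctr⟩
      · simp only [pvCounts, hhit, hkey, hfold]
      · intro p hp
        rw [PySem.Dict.mem_items_insert] at hp
        rcases hp with rfl | ⟨hp, _⟩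
        · exact hctr
        · exact hm1 p hp
-- ----- port A's main loop -----

lemma pv_A_loop (d : PySem.Dict String (List String)) {R : List String} (hg : pvGood d R) :
    ∀ (sl : List String) (res : PySem.Dict String Int), (∀ r ∈ sl, r ∈ R) →
      (∀ i ∈ R, i ∈ res.keys) →
    ∃ resF,
      sl.foldl (fun acc el =>
        acc.bind fun dz =>
          (pvDiscA d (d.size + 1) el []).bind fun z =>
            (PySem.List.remove? z el).bind fun z' =>
              z'.foldl (fun a i => a.bind fun dz2 =>
                  if dz2.contains i then some (dz2.modify i 0 (· + 1)) else none)
                (some dz)) (some res) = some resF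
      ∧ resF.keys = res.keys
      ∧ ∀ k, resF.getD k 0 = res.getD k 0
          + ((sl.map (fun r => ((((d.getD r []).flatMap (pvTrav d d.size)).count k : Nat) : Int))).sum) := by
  intro sl
  induction sl with
  | nil => intro res _ _; exact ⟨res, by simp, rfl, by simp⟩
  | cons r sl ihs =>
    intro res hsl hkeys
    have hr := hsl r List.mem_cons_self
    have hdisc : pvDiscA d (d.size+1) r [] = some ([] ++ pvTrav d (d.size+1) r) :=
      pv_discA_eq d hg (d.size+1) r [] hr (by have := hg.mle r hr; omega)
    have htrav : pvTrav d (d.size+1) r = r :: (d.getD r []).flatMap (pvTrav d d.size) := by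
      simp [pvTrav]
    have htail : ∀ x ∈ (d.getD r []).flatMap (pvTrav d d.size), x ∈ R := by
      intro x hx
      exact pv_trav_mem d hg (d.size+1) r hr x (by rw [htrav]; exact List.mem_cons_of_mem r hx)
    have hguard := pv_guard_fold_elems ((d.getD r []).flatMap (pvTrav d d.size)) res
      (fun i hi => hkeys i (htail i hi))
    have hkeys1 : (((d.getD r []).flatMap (pvTrav d d.size)).foldl
        (fun r i => r.modify i 0 (· + 1)) res).keys = res.keys :=
      pv_keys_modify1_fold _ res (fun i hi => hkeys i (htail i hi))
    obtain ⟨resF, hfold, hkeysF, hvalF⟩ := ihs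
      (((d.getD r []).flatMap (pvTrav d d.size)).foldl (fun r i => r.modify i 0 (· + 1)) res)
      (fun z hz => hsl z (List.mem_cons_of_mem r hz))
      (fun i hi => by rw [hkeys1]; exact hkeys i hi)
    refine ⟨resF, ?_, by rw [hkeysF, hkeys1], ?_⟩
    · rw [List.foldl_cons]
      simp only [Option.bind_some, hdisc, List.nil_append, htrav,
        PySem.List.remove?_cons_self, Option.bind_some]
      rw [hguard]
      exact hfold
    · intro k
      rw [hvalF k, PySem.Dict.getD_foldl_modify_add_one]
      simp [add_assoc]

-- ----- port B's main loop -----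

lemma pv_B_loop (d : PySem.Dict String (List String)) {R : List String} (hg : pvGood d R)
    (y : Int) :
    ∀ (ks : List String) (memo : PySem.Dict String (PySem.Dict String Int))
      (res : PySem.Dict String Int),
      pvMemoOK d R memo →
      (∀ r ∈ ks, ((d.getD r []).length : Int) = y → r ∈ R) →
      (∀ i ∈ R, i ∈ res.keys) →
    ∃ st, ks.foldl (fun acc r =>
        acc.bind fun st =>
          if ((d.getD r []).length : Int) = y then
            (pvCounts d (d.size + 1) st.1 r).bind fun mc =>
              (mc.2.items.foldl (fun a p => a.bind fun rs =>
                  if rs.contains p.1 then some (rs.modify p.1 0 (· + p.2)) else none)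
                (some st.2)).map fun rs => (mc.1, rs.modify r 0 (· - 1))
          else some st) (some (memo, res)) = some st
      ∧ st.2.keys = res.keys
      ∧ ∀ k, st.2.getD k 0 = res.getD k 0
          + (((ks.filter (fun r => ((d.getD r []).length : Int) == y)).map
               (fun r => (pvPCn d r k : Int) - if k = r then 1 else 0)).sum) := by
  intro ks
  induction ks with
  | nil => intro memo res _ _ _; exact ⟨(memo, res), by simp, rfl, by simp⟩
  | cons r ks ihs =>
    intro memo res hm hks hkeys
    by_cases hcond : ((d.getD r []).length : Int) = y
    · have hrR := hks r List.mem_cons_self hcond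
      obtain ⟨memo', c, hcall, hm', hctr⟩ := pv_counts_ok d hg (d.size+1) r memo hm hrR
        (by have := hg.mle r hrR; omega)
      have hsupp_keys : ∀ p ∈ c.items, p.1 ∈ res.keys := fun p hp => hkeys p.1 (hctr.supp p hp)
      have hguard := pv_guard_fold_pairs c.items res hsupp_keys
      have hkeys1 : ((c.items.foldl (fun r p => r.modify p.1 0 (· + p.2)) res).modify r 0
          (· - 1)).keys = res.keys := by
        rw [PySem.Dict.keys_modify .., PySem.Dict.keys_insert_of_contains, pv_keys_modifyp_fold _ res hsupp_keys]
        rw [PySem.Dict.contains_iff_mem_keys]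
        rw [pv_keys_modifyp_fold _ res hsupp_keys]
        exact hkeys r hrR
      have hval1 : ∀ k, ((c.items.foldl (fun r p => r.modify p.1 0 (· + p.2)) res).modify r 0
          (· - 1)).getD k 0
          = res.getD k 0 + ((pvPCn d r k : Int) - if k = r then 1 else 0) := by
        intro k
        rw [PySem.Dict.getD_modify]
        by_cases hk : k = r
        · rw [if_pos hk, pv_getD_modifyp_fold, ← pv_getD_eq_filter_sum c r hctr.nodup,
            hctr.val r, hk]
          norm_num
          ring
        · rw [if_neg hk, pv_getD_modifyp_fold, ← pv_getD_eq_filter_sum c k hctr.nodup,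
            hctr.val k, if_neg hk]
          ring
      obtain ⟨st, hfold, hkeysF, hvalF⟩ := ihs memo'
        ((c.items.foldl (fun r p => r.modify p.1 0 (· + p.2)) res).modify r 0 (· - 1))
        hm' (fun z hz hzc => hks z (List.mem_cons_of_mem r hz) hzc)
        (fun i hi => by rw [hkeys1]; exact hkeys i hi)
      refine ⟨st, ?_, by rw [hkeysF, hkeys1], ?_⟩
      · rw [List.foldl_cons]
        simp only [Option.bind_some, if_pos hcond, hcall, Option.bind_some, hguard,
          Option.map_some]
        exact hfold
      · intro k
        rw [hvalF k, hval1 k]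
        have hfil : (r :: ks).filter (fun r => ((d.getD r []).length : Int) == y)
            = r :: ks.filter (fun r => ((d.getD r []).length : Int) == y) := by
          simp [hcond]
        rw [hfil, List.map_cons, List.sum_cons]
        ring
    · obtain ⟨st, hfold, hkeysF, hvalF⟩ := ihs memo res hm
        (fun z hz hzc => hks z (List.mem_cons_of_mem r hz) hzc) hkeys
      refine ⟨st, ?_, hkeysF, ?_⟩
      · rw [List.foldl_cons]
        simp only [Option.bind_some, if_neg hcond]
        exact hfold
      · intro k
        rw [hvalF k]
        have hfil : (r :: ks).filter (fun r => ((d.getD r []).length : Int) == y)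
            = ks.filter (fun r => ((d.getD r []).length : Int) == y) := by
          simp [hcond]
        rw [hfil]
-- ----- assembly -----

lemma pv_dizlun_keys_aux (d : PySem.Dict String (List String)) (y : Int) :
    ∀ (l : List String) (dz : PySem.Dict String (List String)),
      (∀ k ∈ l, dz.contains k = false) → l.Nodup →
      (l.foldl (fun diz3 el => if ((d.getD el []).length : Int) = y
          then diz3.insert el (d.getD el []) else diz3) dz).keys
        = dz.keys ++ l.filter (fun k => ((d.getD k []).length : Int) == y) := by
  intro l
  induction l with
  | nil => intro dz _ _; simp
  | cons x l ih =>
    intro dz hfresh hnd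
    rw [List.foldl_cons]
    by_cases hc : ((d.getD x []).length : Int) = y
    · rw [if_pos hc, ih _ ?fresh (List.Nodup.of_cons hnd)]
      · rw [PySem.Dict.keys_insert_of_not_contains _ _ (hfresh x List.mem_cons_self)]
        simp [hc]
      case fresh =>
        intro k hk
        rw [PySem.Dict.contains_insert]
        have hne : (k == x) = false := by
          simp only [beq_eq_false_iff_ne, ne_eq]
          rintro rfl
          exact (List.nodup_cons.mp hnd).1 hk
        rw [hne, Bool.false_or]
        exact hfresh k (List.mem_cons_of_mem _ hk)
    · rw [if_neg hc, ih dz (fun k hk => hfresh k (List.mem_cons_of_mem _ hk))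
        (List.Nodup.of_cons hnd)]
      simp [hc]

lemma pv_dizlun_keys (d : PySem.Dict String (List String)) (y : Int) (hnd : d.keys.Nodup) :
    (pvDizLun d y).keys = pvSel d y := by
  rw [pvDizLun, pv_dizlun_keys_aux d y d.keys PySem.Dict.empty
    (fun k _ => PySem.Dict.contains_empty k) hnd]
  simp [pvSel, PySem.Dict.keys_empty]

lemma pv_res0_keys_aux : ∀ (l : List String) (dz : PySem.Dict String Int),
    (∀ k ∈ l, dz.contains k = false) → l.Nodup →
    (l.foldl (fun dz r => dz.insert r (0 : Int)) dz).keys = dz.keys ++ l := by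
  intro l
  induction l with
  | nil => intro dz _ _; simp
  | cons x l ih =>
    intro dz hfresh hnd
    rw [List.foldl_cons, ih _ ?fresh (List.Nodup.of_cons hnd)]
    · rw [PySem.Dict.keys_insert_of_not_contains _ _ (hfresh x List.mem_cons_self)]
      simp
    case fresh =>
      intro k hk
      rw [PySem.Dict.contains_insert]
      have hne : (k == x) = false := by
        simp only [beq_eq_false_iff_ne, ne_eq]
        rintro rfl
        exact (List.nodup_cons.mp hnd).1 hk
      rw [hne, Bool.false_or]
      exact hfresh k (List.mem_cons_of_mem _ hk)

-- the two per-root contributions agree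
lemma pv_term_eq (d : PySem.Dict String (List String)) (r k : String) :
    ((((d.getD r []).flatMap (pvTrav d d.size)).count k : Nat) : Int)
      = (pvPCn d r k : Int) - if k = r then 1 else 0 := by
  unfold pvPCn
  rw [show pvTrav d (d.size+1) r = r :: (d.getD r []).flatMap (pvTrav d d.size) from by
    simp [pvTrav]]
  rw [List.count_cons]
  by_cases h : k = r
  · subst h
    rw [beq_self_eq_true k, if_pos rfl, if_pos rfl]
    push_cast
    ring
  · have hb : (r == k) = false := beq_eq_false_iff_ne.mpr (Ne.symm h)
    rw [hb]
    simp only [Bool.false_eq_true, if_false, if_neg h]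
    push_cast
    ring

lemma pv_main (dizionario : List (String × List String)) (y : Int)
    (h1 : ∀ x ∈ pvRAll (PySem.Dict.ofList dizionario) y, x ∈ (PySem.Dict.ofList dizionario).keys)
    (h2 : ∀ x ∈ pvRAll (PySem.Dict.ofList dizionario) y,
      x ∉ pvExpand (PySem.Dict.ofList dizionario) (PySem.Dict.ofList dizionario).size
            ((PySem.Dict.ofList dizionario).getD x [])) :
    creadiz_finale dizionario y = creadiz_finale_alt dizionario y := by
  have hg := pv_pre_good (PySem.Dict.ofList dizionario) y h1 h2
  set d := PySem.Dict.ofList dizionario with hd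
  have hknd : d.keys.Nodup := PySem.Dict.nodup_keys_ofList dizionario
  have hres0keys : (d.keys.foldl (fun dz r => dz.insert r (0 : Int)) PySem.Dict.empty).keys
      = d.keys := by
    rw [pv_res0_keys_aux d.keys PySem.Dict.empty (fun k _ => PySem.Dict.contains_empty k) hknd,
      PySem.Dict.keys_empty]
    rfl
  have hres0get : ∀ k, (d.keys.foldl (fun dz r => dz.insert r (0 : Int))
      PySem.Dict.empty).getD k 0 = 0 := by
    intro k
    exact pv_getD_init_fold d.keys PySem.Dict.empty k (PySem.Dict.getD_empty k 0)
  have hselR : ∀ r ∈ pvSel d y, r ∈ pvRAll d y := pv_subset_expand d d.size (pvSel d y)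
  have hRkeys0 : ∀ i ∈ pvRAll d y,
      i ∈ (d.keys.foldl (fun dz r => dz.insert r (0 : Int)) PySem.Dict.empty).keys := by
    rw [hres0keys]; exact hg.keysR
  obtain ⟨resA, hfoldA, hkeysA, hvalA⟩ := pv_A_loop d hg (pvSel d y)
    (d.keys.foldl (fun dz r => dz.insert r (0 : Int)) PySem.Dict.empty) hselR hRkeys0
  have hmemo0 : pvMemoOK d (pvRAll d y) PySem.Dict.empty := by
    intro p hp
    have hitems : (PySem.Dict.empty : PySem.Dict String (PySem.Dict String Int)).items = [] := rfl
    rw [hitems] at hp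
    exact absurd hp (List.not_mem_nil)
  obtain ⟨stB, hfoldB, hkeysB, hvalB⟩ := pv_B_loop d hg y d.keys PySem.Dict.empty
    (d.keys.foldl (fun dz r => dz.insert r (0 : Int)) PySem.Dict.empty) hmemo0
    (fun r hr hc => hselR r (List.mem_filter.2 ⟨hr, by simp [hc]⟩)) hRkeys0
  unfold creadiz_finale creadiz_finale_alt
  simp only [← hd, pv_dizlun_keys d y hknd, hfoldA, hfoldB]
  have hndA : resA.keys.Nodup := by rw [hkeysA, hres0keys]; exact hknd
  have hndB : stB.2.keys.Nodup := by rw [hkeysB, hres0keys]; exact hknd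
  rw [PySem.Dict.items_eq_map_keys resA hndA 0, PySem.Dict.items_eq_map_keys stB.2 hndB 0,
    hkeysA, hkeysB, hres0keys]
  apply List.map_congr_left
  intro k _
  have hA := hvalA k
  have hB := hvalB k
  rw [hres0get k] at hA hB
  have hfil : List.filter (fun r => ((d.getD r []).length : Int) == y) d.keys = pvSel d y := rfl
  rw [hA, hB, hfil]
  simp only [zero_add]
  exact congrArg (Prod.mk k) (congrArg List.sum (List.map_congr_left (fun r _ => pv_term_eq d r k)))

-- ===== VERDICT (by name: the statement is the Claim_ definition above) =====
theorem creadiz_finale_spec : Claim_equal_creadiz_finale := by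
  intro dizionario y _ hpre
  show creadiz_finale dizionario y = creadiz_finale_alt dizionario y
  exact pv_main dizionario y hpre.1 hpre.2
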